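-- pv_equiv track=rewrite | github.com/egarrityrokous/portfolio | lab04/voting.py | leastVotes
-- ===== SOURCE A (Python) =====
-- def uniques(candidateList):
--     ''' This function takes as input a list, preferably a ballot of names a
--     person voted for in an election, and returns a new list of only the unique
--     items in the originally inputted list.
--
--     >>> uniques(['Bush', 'Gore', 'Nader', 'Gore', 'Bush'])
--     ['Bush', 'Gore', 'Nader']
--     >>> uniques(['12', '143', '134', '12', '123', '119', '134', '119'])
--     ['12', '143', '134', '123', '119']
--     '''
--
--     uniqueNames = []
--     for name in candidateList:
--         if name not in uniqueNames:
--             #$ uniqueNames.append(name) is more efficient then +=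
--             uniqueNames += [name]
--     return uniqueNames
--
-- def leastVotes(firstChoiceList):
--     ''' This function takes as input a list of strings, preferably a list
--     of first choice candidates in an election, and returns a list of the least
--     popular items in that originally inputted list.
--
--     >>> leastVotes(['Obama','McCain','Obama','Obama','McCain','Nader','Barr'])
--     ['Nader', 'Barr']
--     >>> leastVotes(['pie', 'pie', 'why', 'why', 'why', 'hi', 'bye', 'sigh'])
--     ['hi', 'bye', 'sigh']
--     '''
--
--     leastPopular = []
--     count = len(firstChoiceList) #$ good choice for initialization!
--     # the maximum length of firstChoiceList is the maximum number of votes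
--     # a candidate can get
--
--     for leastVotedFor in firstChoiceList:
--         if firstChoiceList.count(leastVotedFor) < count:
--             count = firstChoiceList.count(leastVotedFor)
--             leastPopular = [leastVotedFor]
--             # if the number of times a candidate appears in firstChoiceList
--             # is less than the current count, count gets said number of times,
--             # and accumulator list is updated to that candidate
--         elif firstChoiceList.count(leastVotedFor) == count:
--             leastPopular.append(leastVotedFor)
--         # when number of times least popular candidate appears in
--         # firstChoiceList is equal to count, they're added to accumulator list
--
--     return uniques(leastPopular)
-- ===== SOURCE B (Python) =====
-- def leastVotes(firstChoiceList):
--     ''' Least-frequent items of firstChoiceList, in first-appearance order.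
--
--     One-pass frequency table instead of A's repeated .count scans and
--     running-minimum reset/append logic.
--     '''
--     if not firstChoiceList:
--         return []
--     counts = {}
--     for name in firstChoiceList:
--         counts[name] = counts.get(name, 0) + 1
--     m = min(counts.values())
--     return [name for name, c in counts.items() if c == m]
-- ===== Notes on version B (the rewrite author's own statement) =====
-- stated objective: faster
-- what changed: B builds a frequency dict in one pass, takes the min of its values, and filters the dict's first-appearance-ordered keys, replacing A's quadratic repeated .count scans with running-minimum reset/append plus a separate uniques pass.
import Mathlib
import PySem

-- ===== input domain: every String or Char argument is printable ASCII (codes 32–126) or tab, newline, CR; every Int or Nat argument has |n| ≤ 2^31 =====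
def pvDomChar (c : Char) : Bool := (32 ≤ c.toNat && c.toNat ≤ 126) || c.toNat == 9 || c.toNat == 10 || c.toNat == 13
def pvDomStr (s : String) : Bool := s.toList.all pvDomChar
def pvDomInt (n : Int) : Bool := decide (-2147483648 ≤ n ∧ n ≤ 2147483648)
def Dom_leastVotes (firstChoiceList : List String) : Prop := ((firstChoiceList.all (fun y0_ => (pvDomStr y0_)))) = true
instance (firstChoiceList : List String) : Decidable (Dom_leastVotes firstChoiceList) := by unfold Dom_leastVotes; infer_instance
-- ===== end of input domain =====

-- B replaces A's quadratic repeated-.count scans with a one-pass frequency dict,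
-- min of its values, and one ordered filter of its keys (faster: O(n) vs O(n^2)).

-- ===== PORT A =====
def uniquesPy (candidateList : List String) : List String :=
  candidateList.foldl (fun uniqueNames name =>
    if uniqueNames.contains name then uniqueNames else uniqueNames ++ [name]) []

def leastVotes (firstChoiceList : List String) : List String :=
  let st := firstChoiceList.foldl (fun (s : List String × Int) leastVotedFor =>
      if (PySem.List.count firstChoiceList leastVotedFor : Int) < s.2 then
        ([leastVotedFor], (PySem.List.count firstChoiceList leastVotedFor : Int))
      else if (PySem.List.count firstChoiceList leastVotedFor : Int) = s.2 then
        (s.1 ++ [leastVotedFor], s.2)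
      else s) ([], (firstChoiceList.length : Int))
  uniquesPy st.1

-- ===== PORT B =====
def leastVotes_alt (firstChoiceList : List String) : List String :=
  if firstChoiceList = [] then []
  else
    let counts : PySem.Dict String Int :=
      firstChoiceList.foldl (fun d name => d.insert name (d.getD name 0 + 1)) PySem.Dict.empty
    match PySem.List.min? counts.values (fun v => v) with
    | some m => (counts.items.filter (fun kc => kc.2 == m)).map Prod.fst
    | none => []   -- unreachable: counts is nonempty when the list is

-- ===== PRECONDITION & SPEC =====
def Spec_leastVotes (firstChoiceList : List String) (out : List String) : Prop := out = leastVotes_alt firstChoiceList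
instance (firstChoiceList : List String) (out : List String) : Decidable (Spec_leastVotes firstChoiceList out) := by unfold Spec_leastVotes; infer_instance

-- ===== CLAIM (what is proved, stated in full; the proofs are below) =====
def Claim_equal_leastVotes : Prop := ∀ (firstChoiceList : List String), Dom_leastVotes firstChoiceList → Spec_leastVotes firstChoiceList (leastVotes firstChoiceList)

-- ===== LEMMAS AND PROOFS =====

-- A's loop invariant: after a prefix p, the running minimum is the min of the full-list
-- counts over p (initialised with len), and the accumulator holds exactly the occurrences
-- in p whose full-list count equals that minimum.
theorem pvLoopA (L : List String) (p : List String) :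
    p.foldl (fun (s : List String × Int) x =>
      if (PySem.List.count L x : Int) < s.2 then
        ([x], (PySem.List.count L x : Int))
      else if (PySem.List.count L x : Int) = s.2 then
        (s.1 ++ [x], s.2)
      else s) ([], (L.length : Int))
    = (p.filter (fun x => (PySem.List.count L x : Int)
          == (p.map (fun y => (PySem.List.count L y : Int))).foldl min (L.length : Int)),
       (p.map (fun y => (PySem.List.count L y : Int))).foldl min (L.length : Int)) := by
  induction p using List.reverseRecOn with
  | nil => simp
  | append_singleton p x ih =>
    have hmin := PySem.List.foldl_min_le (p.map (fun y => (PySem.List.count L y : Int))) (L.length : Int)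
    set m := (p.map (fun y => (PySem.List.count L y : Int))).foldl min (L.length : Int) with hm
    set c := (PySem.List.count L x : Int) with hc
    have hmap : ((p ++ [x]).map (fun y => (PySem.List.count L y : Int))).foldl min (L.length : Int)
        = min m c := by
      rw [List.map_append, List.foldl_append]; rfl
    rw [List.foldl_append, ih]
    simp only [List.foldl_cons, List.foldl_nil, hmap]
    have hcL : ((List.count x L : Int)) = c := by rw [hc, PySem.List.count_eq]
    rcases lt_trichotomy c m with h | h | h
    · rw [if_pos h, min_eq_right (le_of_lt h)]
      have hnil : p.filter (fun y => (PySem.List.count L y : Int) == c) = [] := by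
        rw [List.filter_eq_nil_iff]
        intro y hy
        have : m ≤ (PySem.List.count L y : Int) := hmin.2 _ (List.mem_map_of_mem hy)
        simp only [beq_iff_eq]
        omega
      rw [List.filter_append, hnil]
      simp [hcL]
    · rw [if_neg (by omega), if_pos h, min_eq_right (le_of_eq h)]
      rw [List.filter_append, h]
      simp [hcL, h]
    · rw [if_neg (by omega), if_neg (by omega), min_eq_left (le_of_lt h)]
      have hx : ((List.count x L : Int)) ≠ m := by omega
      simp [List.filter_append, PySem.List.count_eq, hx]

theorem uniquesPy_eq_ofList (xs : List String) : uniquesPy xs = PySem.Set.ofList xs := by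
  rw [PySem.Set.ofList_eq_foldl]; rfl

-- dedup (first occurrences, in order) commutes with filter
theorem pvFoldlAddFilter (p : String → Bool) (L : List String) :
    ∀ s : List String,
      (L.filter p).foldl PySem.Set.add (s.filter p) = (L.foldl PySem.Set.add s).filter p := by
  induction L with
  | nil => intro s; rfl
  | cons x t ih =>
    intro s
    have hadd : (PySem.Set.add s x).filter p
        = if p x then PySem.Set.add (s.filter p) x else s.filter p := by
      simp only [PySem.Set.add, PySem.Set.contains]
      by_cases hmem : x ∈ s
      · have h1 : s.contains x = true := by simpa using hmem
        rw [if_pos h1]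
        by_cases hp : p x
        · have h2 : (s.filter p).contains x = true := by
            simp [List.mem_filter, hmem, hp]
          rw [if_pos hp, if_pos h2]
        · rw [if_neg hp]
      · have h1 : ¬ s.contains x = true := by simpa using hmem
        rw [if_neg h1, List.filter_append]
        by_cases hp : p x
        · have h2 : ¬ (s.filter p).contains x = true := by
            simp [List.mem_filter, hmem]
          rw [if_pos hp, if_neg h2, List.filter_cons, if_pos hp, List.filter_nil]
        · rw [if_neg hp, List.filter_cons, if_neg hp, List.filter_nil, List.append_nil]
    simp only [List.foldl_cons, List.filter_cons]
    by_cases hp : p x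
    · rw [if_pos hp, List.foldl_cons, ← ih (PySem.Set.add s x), hadd, if_pos hp]
    · rw [if_neg hp, ← ih (PySem.Set.add s x), hadd, if_neg hp]

theorem pvOfListFilter (p : String → Bool) (L : List String) :
    PySem.Set.ofList (L.filter p) = (PySem.Set.ofList L).filter p := by
  rw [PySem.Set.ofList_eq_foldl, PySem.Set.ofList_eq_foldl]
  simpa using pvFoldlAddFilter p L []

theorem leastVotes_spec' (L : List String) : leastVotes L = leastVotes_alt L := by
  rcases eq_or_ne L [] with rfl | hne
  · rfl
  · -- unfold both sides
    unfold leastVotes leastVotes_alt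
    rw [if_neg hne, pvLoopA, PySem.Dict.foldl_insert_getD_add_one_eq_counter]
    dsimp only
    simp only [PySem.List.count_eq]
    set M := (L.map (fun y => (List.count y L : Int))).foldl min (L.length : Int) with hM
    -- the dict's values are the counts of the distinct elements
    have hvals : (PySem.Dict.counter L).values
        = (PySem.Set.ofList L).map (fun k => ((List.count k L : Int))) := by
      simp [PySem.Dict.values, PySem.Dict.items_counter]
    -- values is nonempty, so min? returns some m
    have hnil : (PySem.Dict.counter L).values ≠ [] := by
      rcases List.exists_mem_of_ne_nil L hne with ⟨a, ha⟩
      rw [hvals]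
      have : a ∈ PySem.Set.ofList L := (PySem.Set.mem_ofList L a).mpr ha
      exact fun h => by simp [List.map_eq_nil_iff.mp h] at this
    obtain ⟨m, hmeq⟩ : ∃ m, PySem.List.min? (PySem.Dict.counter L).values (fun v => v) = some m := by
      cases hq : PySem.List.min? (PySem.Dict.counter L).values (fun v => v) with
      | none => exact absurd ((PySem.List.min?_eq_none_iff _ _).mp hq) hnil
      | some m => exact ⟨m, rfl⟩
    rw [hmeq]
    dsimp only
    -- m = M
    have hmmem : m ∈ (PySem.Dict.counter L).values := PySem.List.min?_mem hmeq
    have hmisMin : ∀ v ∈ (PySem.Dict.counter L).values, m ≤ v := by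
      intro v hv; exact PySem.List.min?_isMin hmeq v hv
    have hMle := PySem.List.foldl_min_le (L.map (fun y => (List.count y L : Int))) (L.length : Int)
    have hMm : M = m := by
      have h1 : M ≤ m := by
        rw [hvals] at hmmem
        rcases List.mem_map.mp hmmem with ⟨k, hk, hkeq⟩
        have hkL : k ∈ L := (PySem.Set.mem_ofList L k).mp hk
        have hle := hMle.2 _ (List.mem_map_of_mem (f := fun y => (List.count y L : Int)) hkL)
        exact le_of_le_of_eq hle hkeq
      have h2 : ∃ x ∈ L, (List.count x L : Int) = M := by
        rcases PySem.List.foldl_min_mem (L.map (fun y => (List.count y L : Int))) (L.length : Int) with h | h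
        · -- M = len: then any element's count is squeezed to len
          rcases List.exists_mem_of_ne_nil L hne with ⟨a, ha⟩
          refine ⟨a, ha, ?_⟩
          have hle : (List.count a L : Int) ≤ (L.length : Int) := by
            exact_mod_cast List.count_le_length
          have hge : M ≤ (List.count a L : Int) :=
            hMle.2 _ (List.mem_map_of_mem (f := fun y => (List.count y L : Int)) ha)
          have hMlen : M = (L.length : Int) := h
          omega
        · rcases List.mem_map.mp h with ⟨x, hx, hxeq⟩
          exact ⟨x, hx, hxeq⟩
      rcases h2 with ⟨x, hx, hxeq⟩
      have hxv : (List.count x L : Int) ∈ (PySem.Dict.counter L).values := by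
        rw [hvals]
        exact List.mem_map_of_mem ((PySem.Set.mem_ofList L x).mpr hx)
      have hmle := hmisMin _ hxv
      omega
    -- both sides are the ordered dedup of min-count elements
    rw [uniquesPy_eq_ofList, pvOfListFilter, PySem.Dict.items_counter, List.filter_map, List.map_map]
    rw [hMm]
    have hid : (Prod.fst ∘ fun k => (k, (List.count k L : Int))) = id := rfl
    rw [hid, List.map_id]
    rfl

-- ===== VERDICT (by name: the statement is the Claim_ definition above) =====
theorem leastVotes_spec : Claim_equal_leastVotes := by
  intro L _
  exact leastVotes_spec' L
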